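-- pv_equiv track=rewrite | github.com/sonny0430/Coding_Python | 프로그래머스/1/135808. 과일 장수/과일 장수.py | solution
-- ===== SOURCE A (Python) =====
-- def solution(k, m, score):
--     goods = sorted(score, reverse=True)
--
--     temp_all = []
--     temp = []
--
--     for i in goods:
--         if len(temp) == m-1:
--             temp.append(i)
--             temp_all.append(temp)
--             temp = []
--         else:
--             temp.append(i)
--
--     result = 0
--     for l in temp_all:
--         result += min(l) * m
--
--     return result
-- ===== SOURCE B (Python) =====
-- def solution(k, m, score):
--     # In the descending-sorted list the minimum of each full size-m box is its
--     # last element, so sum directly by striding over indices m-1, 2m-1, ...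
--     goods = sorted(score, reverse=True)
--     return sum(goods[i] * m for i in range(m - 1, len(goods), m))
-- ===== Notes on version B (the rewrite author's own statement) =====
-- stated objective: simpler
-- what changed: B drops A's box-building loop (accumulating sublists in temp/temp_all) and the per-box min() scans, summing goods[i]*m directly over the strided indices range(m-1, len(goods), m) of the descending-sorted list, whose minima are exactly those elements.
-- outside the precondition, e.g. on solution(0, 0, [1]): A returns 0, B raises ValueError
import Mathlib
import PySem

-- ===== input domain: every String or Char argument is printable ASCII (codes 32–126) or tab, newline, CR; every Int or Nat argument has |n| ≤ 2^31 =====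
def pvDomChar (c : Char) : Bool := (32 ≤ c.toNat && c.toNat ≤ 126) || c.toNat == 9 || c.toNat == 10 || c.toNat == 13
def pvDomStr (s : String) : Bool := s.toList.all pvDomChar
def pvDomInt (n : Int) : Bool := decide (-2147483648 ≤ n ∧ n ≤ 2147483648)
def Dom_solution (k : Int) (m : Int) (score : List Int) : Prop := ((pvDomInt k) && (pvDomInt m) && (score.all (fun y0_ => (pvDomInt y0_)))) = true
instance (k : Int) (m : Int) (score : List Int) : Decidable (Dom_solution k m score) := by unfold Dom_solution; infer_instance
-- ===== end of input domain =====

-- B replaces A's box-building loop and per-box min() scans by one strided index loop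
-- over the descending-sorted list (each box minimum is its last element): simpler.


-- ===== PORT A =====
-- min(l) is only applied to the boxes in temp_all, which are nonempty by
-- construction, so the `.getD 0` default is never consulted.
def solution (k : Int) (m : Int) (score : List Int) : Int :=
  let goods := PySem.List.sorted score (fun x => x) true
  let st := goods.foldl
    (fun (s : List (List Int) × List Int) i =>
      if (s.2.length : Int) = m - 1 then (s.1 ++ [s.2 ++ [i]], ([] : List Int))
      else (s.1, s.2 ++ [i])) ([], [])
  st.1.foldl (fun r l => r + ((PySem.List.min? l (fun x => x)).getD 0) * m) 0

-- ===== PORT B =====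
-- goods[i] for i drawn from range(m-1, len(goods), m) is always in range when
-- m ≠ 0, so the `.getD 0` default is never consulted.
def solution_alt (k : Int) (m : Int) (score : List Int) : Int :=
  let goods := PySem.List.sorted score (fun x => x) true
  (PySem.List.pyRange (m - 1) goods.length m).foldl
    (fun r i => r + ((PySem.List.pyGet? goods i).getD 0) * m) 0

-- ===== PRECONDITION & SPEC =====
-- Pre_ excludes only m = 0, where B's range(m-1, len, 0) raises ValueError
-- (A returns 0 there, its loop condition never firing).
def Pre_solution (k : Int) (m : Int) (score : List Int) : Prop := m ≠ 0
instance (k : Int) (m : Int) (score : List Int) : Decidable (Pre_solution k m score) := by unfold Pre_solution; infer_instance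

def pvWitness_solution : Int × Int × List Int := (0, 2, [1, 2, 3])

def Spec_solution (k : Int) (m : Int) (score : List Int) (out : Int) : Prop := out = solution_alt k m score
instance (k : Int) (m : Int) (score : List Int) (out : Int) : Decidable (Spec_solution k m score out) := by unfold Spec_solution; infer_instance

-- ===== CLAIM (what is proved, stated in full; the proofs are below) =====
def Claim_equal_solution : Prop := ∀ (k : Int) (m : Int) (score : List Int), Dom_solution k m score → Pre_solution k m score → Spec_solution k m score (solution k m score)

-- ===== LEMMAS AND PROOFS =====

-- A's grouping step (the body of its first loop), named for the lemmas.
def stepA (m : Int) (s : List (List Int) × List Int) (i : Int) : List (List Int) × List Int :=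
  if (s.2.length : Int) = m - 1 then (s.1 ++ [s.2 ++ [i]], ([] : List Int))
  else (s.1, s.2 ++ [i])

-- the accumulated box list only grows by appending: factor out the initial ta
lemma foldl_stepA_factor (m : Int) :
    ∀ (rest : List Int) (ta : List (List Int)) (t : List Int),
      rest.foldl (stepA m) (ta, t) =
        (ta ++ (rest.foldl (stepA m) ([], t)).1, (rest.foldl (stepA m) ([], t)).2) := by
  intro rest
  induction rest with
  | nil => intro ta t; simp
  | cons i r ih =>
    intro ta t
    simp only [List.foldl_cons, stepA]
    split_ifs with h
    · rw [ih (ta ++ [t ++ [i]]) [], ih ([] ++ [t ++ [i]]) []]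
      simp
    · exact ih ta (t ++ [i])

-- a run too short to fill a box (or m ≤ 0) just accumulates into temp
lemma foldl_stepA_short (m : Int) :
    ∀ (c : List Int) (ta : List (List Int)) (t : List Int),
      ((t.length : Int) + c.length < m ∨ m ≤ 0) →
      c.foldl (stepA m) (ta, t) = (ta, t ++ c) := by
  intro c
  induction c with
  | nil => intro ta t _; simp
  | cons i r ih =>
    intro ta t h
    simp only [List.foldl_cons, stepA]
    rw [if_neg (by simp only [List.length_cons] at h; omega)]
    rw [ih ta (t ++ [i]) (by simp at h ⊢; omega)]
    simp

-- a run that exactly fills the box closes it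
lemma foldl_stepA_chunk (m : Int) :
    ∀ (c : List Int) (t : List Int) (ta : List (List Int)),
      c ≠ [] → (t.length : Int) + c.length = m →
      c.foldl (stepA m) (ta, t) = (ta ++ [t ++ c], []) := by
  intro c
  induction c with
  | nil => intro t ta h _; exact absurd rfl h
  | cons i r ih =>
    intro t ta _ h
    simp only [List.foldl_cons, stepA]
    rcases List.eq_nil_or_concat r with hr | _
    · subst hr
      rw [if_pos (by simp at h ⊢; omega)]
      simp
    · rw [if_neg (by simp only [List.length_cons] at h; rcases r with _ | _ <;> simp_all; omega)]
      rw [ih (t ++ [i]) ta (by rcases r with _ | _ <;> simp_all) (by simp at h ⊢; omega)]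
      simp

-- min of a descending-sorted nonempty list is its last element
lemma foldl_min_desc :
    ∀ (t : List Int) (x : Int), (x :: t).Pairwise (fun a b => b ≤ a) →
      t.foldl min x = (x :: t).getLast (by simp) := by
  intro t
  induction t with
  | nil => intro x _; simp
  | cons y t' ih =>
    intro x hp
    have hxy : y ≤ x := (List.pairwise_cons.mp hp).1 y (by simp)
    have := ih y (List.pairwise_cons.mp hp).2
    simp only [List.foldl_cons, min_eq_right hxy]
    rw [this]
    rfl

-- the heart: on any descending-sorted list the two result loops agree (m > 0)
-- with m > 0 the count of range(m-1, L, m) is L // m, with no side condition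
lemma pyRange_count (m : Int) (hm : 0 < m) (L : Int) (hL : 0 ≤ L) :
    PySem.List.pyRange (m - 1) L m =
      (List.range (L / m).toNat).map (fun k : Nat => (m - 1) + m * (k : Int)) := by
  rw [PySem.List.pyRange_of_pos _ _ hm]
  by_cases h : m - 1 < L
  · rw [if_pos h, show L - (m - 1) + m - 1 = L by ring]
  · rw [if_neg h]
    have : L / m = 0 := Int.ediv_eq_zero_of_lt hL (by omega)
    rw [this]
    simp

lemma main_pos (m : Int) (hm : 0 < m) :
    ∀ (g : List Int), g.Pairwise (fun a b => b ≤ a) →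
      ((g.foldl (stepA m) ([], [])).1.foldl
          (fun r l => r + ((PySem.List.min? l (fun x => x)).getD 0) * m) 0)
        = (PySem.List.pyRange (m - 1) g.length m).foldl
            (fun r i => r + ((PySem.List.pyGet? g i).getD 0) * m) 0 := by
  suffices H : ∀ (n : Nat) (g : List Int), g.length = n →
      g.Pairwise (fun a b => b ≤ a) →
      ((g.foldl (stepA m) ([], [])).1.foldl
          (fun r l => r + ((PySem.List.min? l (fun x => x)).getD 0) * m) 0)
        = (PySem.List.pyRange (m - 1) g.length m).foldl
            (fun r i => r + ((PySem.List.pyGet? g i).getD 0) * m) 0 by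
    intro g hp; exact H g.length g rfl hp
  intro n
  induction n using Nat.strong_induction_on with
  | _ n ih =>
    intro g hL hp
    by_cases hlen : (g.length : Int) < m
    · -- fewer than m scores: no box on either side
      rw [foldl_stepA_short m g [] [] (Or.inl (by simpa using hlen))]
      rw [pyRange_count m hm _ (by positivity)]
      rw [show (g.length : Int) / m = 0 from Int.ediv_eq_zero_of_lt (by positivity) hlen]
      simp
    · -- peel off the first full box of m scores
      rw [not_lt] at hlen
      have hM1 : (1:Int) ≤ m := hm
      set M := m.toNat with hMdef
      have hmM : (M : Int) = m := Int.toNat_of_nonneg (le_of_lt hm)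
      obtain ⟨c, rest, hg, hc⟩ : ∃ c rest, g = c ++ rest ∧ c.length = M :=
        ⟨g.take M, g.drop M, (List.take_append_drop M g).symm,
          List.length_take_of_le (by omega)⟩
      have hcne : c ≠ [] := by
        intro h; rw [h] at hc; simp at hc; omega
      have hlg : g.length = M + rest.length := by rw [hg]; simp [hc]
      -- A side: the first loop closes box c, then continues on rest
      have hA : (g.foldl (stepA m) ([], [])).1 = c :: (rest.foldl (stepA m) ([], [])).1 := by
        rw [hg, List.foldl_append,
          foldl_stepA_chunk m c [] [] hcne (by simp [hc, hmM]),
          show ([] ++ [([]:List Int) ++ c], ([]:List Int)) = ([c], []) by simp,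
          foldl_stepA_factor m rest [c] []]
        simp
      rw [hA]
      simp only [List.foldl_cons]
      rw [PySem.List.foldl_add, PySem.List.foldl_add]
      -- B side: the index list is (m-1) followed by the shifted index list of rest
      rw [pyRange_count m hm _ (by positivity)]
      have hq : ((g.length : Int) / m).toNat = ((rest.length : Int) / m).toNat + 1 := by
        have h1 : (g.length : Int) = (rest.length : Int) + 1 * m := by
          rw [hlg]; push_cast; omega
        have h2 : (0:Int) ≤ (rest.length : Int) / m :=
          Int.ediv_nonneg (by positivity) (le_of_lt hm)
        rw [h1, Int.add_mul_ediv_right _ _ (ne_of_gt hm)]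
        omega
      rw [hq, List.range_succ_eq_map]
      simp only [List.map_cons, List.map_map, List.sum_cons, Function.comp_def]
      -- first terms agree: min of the descending box c is its last element g[m-1]
      have hfirst : ((PySem.List.min? c (fun x => x)).getD 0)
          = (PySem.List.pyGet? g ((m - 1) + m * (0:Nat))).getD 0 := by
        obtain ⟨x, t, hct⟩ : ∃ x t, c = x :: t := by
          cases c with
          | nil => exact absurd rfl hcne
          | cons x t => exact ⟨x, t, rfl⟩
        have hcp : c.Pairwise (fun a b => b ≤ a) :=
          (hg ▸ hp).sublist (List.sublist_append_left c rest)
        rw [hct, PySem.List.min?_id_cons, Option.getD_some,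
          foldl_min_desc t x (hct ▸ hcp)]
        have hidx : (0:Int) ≤ (m - 1) + m * (0:Nat) := by push_cast; omega
        rw [PySem.List.pyGet?_of_nonneg g hidx]
        have hidxn : ((m - 1) + m * ((0:Nat):Int)).toNat = M - 1 := by
          push_cast; omega
        rw [hidxn, hg, List.getElem?_append_left (by omega),
          List.getElem?_eq_getElem (by omega)]
        rw [show (x :: t).getLast (by simp) = c.getLast (by simp [hct]) from by
          simp [hct]]
        rw [List.getLast_eq_getElem, Option.getD_some]
        congr 1
        · omega
      -- shifted tail terms agree pointwise
      have htail : ∀ j ∈ List.range ((rest.length : Int) / m).toNat,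
          ((PySem.List.pyGet? g ((m - 1) + m * (Nat.succ j))).getD 0) * m
            = ((PySem.List.pyGet? rest ((m - 1) + m * (j:Nat))).getD 0) * m := by
        intro j _
        have h0 : (0:Int) ≤ (m - 1) + m * (Nat.succ j) := by
          have : (0:Int) ≤ m * (Nat.succ j) := by positivity
          omega
        have h1 : (0:Int) ≤ (m - 1) + m * (j:Nat) := by
          have : (0:Int) ≤ m * (j:Nat) := by positivity
          omega
        rw [PySem.List.pyGet?_of_nonneg g h0, PySem.List.pyGet?_of_nonneg rest h1]
        have hsplit : ((m - 1) + m * ((Nat.succ j : Nat) : Int)).toNat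
            = c.length + ((m - 1) + m * ((j:Nat):Int)).toNat := by
          rw [hc]
          have e1 : ((Nat.succ j : Nat) : Int) = (j : Int) + 1 := by push_cast; ring
          rw [e1]
          have e2 : (m - 1) + m * ((j:Int) + 1) = m + ((m - 1) + m * (j:Int)) := by ring
          rw [e2]
          have h3 : (0:Int) ≤ m * (j:Int) := by positivity
          omega
        rw [hsplit, hg, List.getElem?_append_right (Nat.le_add_right _ _),
          Nat.add_sub_cancel_left]
      rw [List.map_congr_left htail, hfirst]
      -- induction on the remaining scores
      have hrest := ih rest.length (by omega) rest rfl
        ((hg ▸ hp).sublist (List.sublist_append_right c rest))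
      rw [pyRange_count m hm _ (by positivity), PySem.List.foldl_add,
        PySem.List.foldl_add, List.map_map] at hrest
      simp only [Function.comp_def] at hrest
      linarith [hrest]

lemma main_neg (m : Int) (hm : m < 0) (g : List Int) :
    ((g.foldl (stepA m) ([], [])).1.foldl
        (fun r l => r + ((PySem.List.min? l (fun x => x)).getD 0) * m) 0)
      = (PySem.List.pyRange (m - 1) g.length m).foldl
          (fun r i => r + ((PySem.List.pyGet? g i).getD 0) * m) 0 := by
  rw [foldl_stepA_short m g [] [] (Or.inr (le_of_lt hm))]
  have h1 : m ≠ 0 := ne_of_lt hm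
  have h2 : ¬ (0:Int) < m := not_lt.mpr (le_of_lt hm)
  have h3 : ¬ ((g.length:Int) < m - 1) := by
    have : (0:Int) ≤ g.length := by positivity
    omega
  simp [PySem.List.pyRange, h1, h2, h3]

-- ===== VERDICT (by name: the statement is the Claim_ definition above) =====
theorem solution_spec : Claim_equal_solution := by
  intro k m score _ hpre
  unfold Spec_solution solution solution_alt
  have hstep : (fun (s : List (List Int) × List Int) i =>
      if (s.2.length : Int) = m - 1 then (s.1 ++ [s.2 ++ [i]], ([] : List Int))
      else (s.1, s.2 ++ [i])) = stepA m := rfl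
  rw [hstep]
  rcases lt_or_gt_of_ne hpre with hneg | hpos
  · exact main_neg m hneg _
  · exact main_pos m hpos _ (PySem.List.sorted_pairwise_rev score (fun x => x))
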